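-- pv_equiv track=rewrite | github.com/christinelinster/ls-py110 | lesson_1/pedac_guided_practice/anagram_difference.py | anagram_difference
-- ===== SOURCE A (Python) =====
-- def anagram_difference(str1, str2):
--     result = 0
--     dict1 = create_dictionary(str1)
--     dict2 = create_dictionary(str2)
--
--     for key, value in dict1.items():
--         if key not in dict2:
--             result += value
--         else:
--             diff = abs(value - dict2.get(key))
--             del dict2[key]
--             result += diff
--
--     for key, value in dict2.items():
--         if key not in dict1:
--             result += value
--
--     return result
--
-- def create_dictionary(word):
--     letters = {}
--     for letter in word:
--         letters[letter] = letters.get(letter, 0) + 1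
--     return letters
-- ===== SOURCE B (Python) =====
-- def anagram_difference(str1, str2):
--     a = sorted(str1)
--     b = sorted(str2)
--     i = j = matches = 0
--     while i < len(a) and j < len(b):
--         if a[i] == b[j]:
--             matches += 1
--             i += 1
--             j += 1
--         elif a[i] < b[j]:
--             i += 1
--         else:
--             j += 1
--     return len(str1) + len(str2) - 2 * matches
-- ===== Notes on version B (the rewrite author's own statement) =====
-- stated objective: alternative
-- what changed: Replaces A's frequency-dict bookkeeping (two dicts, membership tests, del, two accumulation loops) by a sort-and-merge algorithm: sort both strings, walk them with two pointers counting multiset matches, and return len(str1)+len(str2)-2*matches.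
import Mathlib
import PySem

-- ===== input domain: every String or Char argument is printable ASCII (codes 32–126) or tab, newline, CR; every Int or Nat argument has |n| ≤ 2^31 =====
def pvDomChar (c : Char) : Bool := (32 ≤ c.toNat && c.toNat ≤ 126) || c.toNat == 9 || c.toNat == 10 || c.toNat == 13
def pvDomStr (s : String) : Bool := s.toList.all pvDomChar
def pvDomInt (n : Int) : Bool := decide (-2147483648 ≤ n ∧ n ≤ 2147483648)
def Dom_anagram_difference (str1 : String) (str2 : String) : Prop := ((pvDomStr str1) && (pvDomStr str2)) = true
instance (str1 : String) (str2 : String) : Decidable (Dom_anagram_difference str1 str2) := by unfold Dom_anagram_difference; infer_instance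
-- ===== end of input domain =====

-- B replaces A's frequency-dict bookkeeping by sort-both-strings + a two-pointer merge
-- counting multiset matches (alternative algorithm; return value only, no mutation).


-- ===== PORT A =====
def pvCreateDictionary (word : String) : PySem.Dict Char Int :=
  word.toList.foldl (fun letters letter => letters.insert letter (letters.getD letter 0 + 1)) PySem.Dict.empty

-- first loop: state = (result, dict2); 'dict2.get(key)' is only read when 'key in dict2', so getD _ 0 is exact
def anagram_difference (str1 : String) (str2 : String) : Int :=
  let dict1 := pvCreateDictionary str1
  let dict2 := pvCreateDictionary str2
  let st := dict1.items.foldl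
    (fun (st : Int × PySem.Dict Char Int) kv =>
      if st.2.contains kv.1 = false then (st.1 + kv.2, st.2)
      else (st.1 + |kv.2 - st.2.getD kv.1 0|, st.2.erase kv.1))
    ((0 : Int), dict2)
  st.2.items.foldl
    (fun result kv => if dict1.contains kv.1 = false then result + kv.2 else result) st.1

-- ===== PORT B =====
-- the while loop over indices i, j, ported as structural recursion on the two suffixes
def pvMatchGo : List Char → List Char → Nat
  | [], _ => 0
  | _ :: _, [] => 0
  | x :: a, y :: b =>
    if x = y then pvMatchGo a b + 1
    else if x < y then pvMatchGo a (y :: b)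
    else pvMatchGo (x :: a) b
termination_by a b => a.length + b.length

def anagram_difference_alt (str1 : String) (str2 : String) : Int :=
  let a := PySem.List.sorted str1.toList (fun c => c) false
  let b := PySem.List.sorted str2.toList (fun c => c) false
  let m := pvMatchGo a b
  (PySem.Str.len str1 : Int) + (PySem.Str.len str2 : Int) - 2 * (m : Int)

-- ===== PRECONDITION & SPEC =====
def Spec_anagram_difference (str1 : String) (str2 : String) (out : Int) : Prop := out = anagram_difference_alt str1 str2
instance (str1 : String) (str2 : String) (out : Int) : Decidable (Spec_anagram_difference str1 str2 out) := by unfold Spec_anagram_difference; infer_instance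

-- ===== CLAIM (what is proved, stated in full; the proofs are below) =====
def Claim_equal_anagram_difference : Prop := ∀ (str1 : String) (str2 : String), Dom_anagram_difference str1 str2 → Spec_anagram_difference str1 str2 (anagram_difference str1 str2)

-- ===== LEMMAS AND PROOFS =====

-- the per-character |count difference| sum that A computes (proof-side abbreviation)
def pvSumAbs (l1 l2 : List Char) : Int :=
  ((PySem.Set.ofList (l1 ++ l2)).map (fun c => |((l1.count c : Int)) - ((l2.count c : Int))|)).sum

-- ---- A-side: A equals pvSumAbs ----

-- erase only touches its own key
theorem pv_find?_filter_ne {k k' : Char} (h : k' ≠ k) (l : List (Char × Int)) :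
    (l.filter (fun p => !(p.1 == k))).find? (fun p => p.1 == k') = l.find? (fun p => p.1 == k') := by
  induction l with
  | nil => rfl
  | cons p t ih =>
    by_cases hp : p.1 = k
    · simp [hp, Ne.symm h, ih]
    · by_cases hp' : p.1 = k'
      · simp [hp', h]
      · simp [hp, hp', ih]

theorem pv_contains_erase_ne (d : PySem.Dict Char Int) {k k' : Char} (h : k' ≠ k) :
    (d.erase k).contains k' = d.contains k' := by
  rw [Bool.eq_iff_iff]
  simp only [PySem.Dict.contains, PySem.Dict.erase, List.any_eq_true, List.mem_filter,
    beq_iff_eq, Bool.not_eq_eq_eq_not, Bool.not_true]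
  constructor
  · rintro ⟨p, ⟨hp, _⟩, hk'⟩
    exact ⟨p, hp, hk'⟩
  · rintro ⟨p, hp, hk'⟩
    refine ⟨p, ⟨hp, ?_⟩, hk'⟩
    simp [hk' ▸ h]

theorem pv_getD_erase_ne (d : PySem.Dict Char Int) {k k' : Char} (h : k' ≠ k) (dflt : Int) :
    (d.erase k).getD k' dflt = d.getD k' dflt := by
  simp only [PySem.Dict.getD, PySem.Dict.get?, PySem.Dict.erase]
  rw [pv_find?_filter_ne h]

theorem pv_items_filter_self (d : PySem.Dict Char Int) {k : Char} (h : d.contains k = false) :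
    d.items.filter (fun p => !(p.1 == k)) = d.items := by
  apply List.filter_eq_self.2
  intro p hp
  simp only [PySem.Dict.contains, List.any_eq_false] at h
  simpa using h p hp

-- the first loop: adds the per-key contribution and erases the processed keys
theorem pv_loop1 (ps : List (Char × Int)) : ∀ (r : Int) (d : PySem.Dict Char Int),
    (ps.map Prod.fst).Nodup →
    ps.foldl
      (fun (st : Int × PySem.Dict Char Int) kv =>
        if st.2.contains kv.1 = false then (st.1 + kv.2, st.2)
        else (st.1 + |kv.2 - st.2.getD kv.1 0|, st.2.erase kv.1)) (r, d)
    = (r + (ps.map (fun kv => if d.contains kv.1 = false then kv.2 else |kv.2 - d.getD kv.1 0|)).sum,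
       ps.foldl (fun d kv => if d.contains kv.1 = true then d.erase kv.1 else d) d) := by
  induction ps with
  | nil => intro r d _; simp
  | cons kv t ih =>
    intro r d hnd
    rw [List.map_cons, List.nodup_cons] at hnd
    obtain ⟨hk, hndt⟩ := hnd
    by_cases hc : d.contains kv.1 = false
    · simp only [List.foldl_cons, hc, if_true]
      rw [ih (r + kv.2) d hndt]
      simp [hc, add_assoc]
    · have hc' : d.contains kv.1 = true := by simpa using hc
      have hmap : t.map (fun kv' => if (d.erase kv.1).contains kv'.1 = false then kv'.2
            else |kv'.2 - (d.erase kv.1).getD kv'.1 0|)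
          = t.map (fun kv' => if d.contains kv'.1 = false then kv'.2 else |kv'.2 - d.getD kv'.1 0|) := by
        apply List.map_congr_left
        intro p hp
        have hne : p.1 ≠ kv.1 := fun he => hk (he ▸ List.mem_map_of_mem (f := Prod.fst) hp)
        rw [pv_contains_erase_ne d hne, pv_getD_erase_ne d hne]
      simp only [List.foldl_cons, hc', if_neg (by simp : ¬ (true = false))]
      rw [ih _ (d.erase kv.1) hndt, hmap]
      simp [hc, add_assoc]

-- the final dict2: items with processed keys filtered out
theorem pv_fold_erase_items (ps : List (Char × Int)) : ∀ (d : PySem.Dict Char Int),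
    (ps.foldl (fun d kv => if d.contains kv.1 = true then d.erase kv.1 else d) d).items
    = d.items.filter (fun p => !(ps.map Prod.fst).contains p.1) := by
  induction ps with
  | nil => intro d; simp
  | cons kv t ih =>
    intro d
    have hstep : (if d.contains kv.1 = true then d.erase kv.1 else d).items
        = d.items.filter (fun p => !(p.1 == kv.1)) := by
      by_cases hc : d.contains kv.1 = true
      · simp [hc, PySem.Dict.erase]
      · rw [if_neg hc, pv_items_filter_self d (by simpa using hc)]
    rw [List.foldl_cons, ih, hstep, List.filter_filter]
    apply List.filter_congr
    intro p _
    simp only [List.map_cons, List.contains_cons, Bool.not_or]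
    rw [Bool.and_comm, BEq.comm]

-- the second loop as a sum
theorem pv_loop2 (d1 : PySem.Dict Char Int) (l : List (Char × Int)) : ∀ (r : Int),
    l.foldl (fun result kv => if d1.contains kv.1 = false then result + kv.2 else result) r
    = r + (l.map (fun kv => if d1.contains kv.1 = false then kv.2 else 0)).sum := by
  induction l with
  | nil => intro r; simp
  | cons kv t ih =>
    intro r
    by_cases hc : d1.contains kv.1 = false <;> simp [hc, ih, add_assoc]

theorem pv_A_eq_sumAbs (str1 str2 : String) :
    anagram_difference str1 str2 = pvSumAbs str1.toList str2.toList := by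
  unfold anagram_difference pvSumAbs pvCreateDictionary
  rw [PySem.Dict.foldl_insert_getD_add_one_eq_counter, PySem.Dict.foldl_insert_getD_add_one_eq_counter]
  set l1 := str1.toList with hl1
  set l2 := str2.toList with hl2
  dsimp only
  rw [PySem.Dict.items_counter l1]
  have hnd : ((((PySem.Set.ofList l1).map (fun k => (k, (l1.count k : Int)))).map Prod.fst)).Nodup := by
    rw [List.map_map, show (Prod.fst ∘ fun k => (k, (l1.count k : Int))) = id from rfl, List.map_id]
    exact PySem.Set.nodup_ofList l1
  rw [pv_loop1 _ _ _ hnd]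
  dsimp only
  rw [pv_fold_erase_items, pv_loop2, zero_add]
  rw [List.map_map, List.map_map]
  rw [show (Prod.fst ∘ fun k => (k, (l1.count k : Int))) = id from rfl, List.map_id]
  rw [PySem.Dict.items_counter l2, List.filter_map, List.map_map]
  rw [PySem.Set.ofList_append, PySem.Set.update_eq_append_filter, List.map_append, List.sum_append]
  congr 1
  · refine congrArg List.sum (List.map_congr_left ?_)
    intro k hk
    simp only [Function.comp_apply, PySem.Dict.contains_counter, PySem.Dict.getD_counter]
    by_cases h2 : k ∈ l2
    · simp [List.contains_eq_mem, h2]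
    · have : l2.count k = 0 := List.count_eq_zero.2 h2
      simp [h2, this, abs_of_nonneg (Int.natCast_nonneg _)]
  · have hpred : (List.filter ((fun p => !List.contains (PySem.Set.ofList l1) p.1) ∘ fun k => (k, (l2.count k : Int)))
        (PySem.Set.ofList l2)) = (List.filter (fun y => !(PySem.Set.ofList l1).contains y) (PySem.Set.ofList l2)) := by
      apply List.filter_congr
      intro k _
      simp [Function.comp, PySem.Set.contains]
    rw [hpred]
    refine congrArg List.sum (List.map_congr_left ?_)
    intro k hk
    rw [List.mem_filter] at hk
    obtain ⟨hk2, hk1⟩ := hk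
    have hk1' : k ∉ l1 := by
      intro hmem
      simp [PySem.Set.contains, List.contains_eq_mem, (PySem.Set.mem_ofList l1 k).2 hmem] at hk1
    have hc1 : l1.count k = 0 := List.count_eq_zero.2 hk1'
    simp only [Function.comp_apply, PySem.Dict.contains_counter, hc1]
    simp [List.contains_eq_mem, hk1', abs_of_nonpos (by simp : -(l2.count k : Int) ≤ 0)]

-- ---- pvSumAbs as a closed form in lengths and multiset-intersection size ----

theorem pv_cons_inter_cons (x : Char) (s t : Multiset Char) :
    (x ::ₘ s) ∩ (x ::ₘ t) = x ::ₘ (s ∩ t) := by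
  ext c
  by_cases h : c = x <;> simp [Multiset.count_inter, h]

theorem pv_cons_inter_of_notMem (x : Char) (s t : Multiset Char) (h : x ∉ t) :
    (x ::ₘ s) ∩ t = s ∩ t := by
  ext c
  by_cases hc : c = x
  · subst hc
    simp [Multiset.count_inter, Multiset.count_eq_zero_of_notMem h]
  · simp [Multiset.count_inter, hc]

theorem pv_inter_cons_of_notMem (x : Char) (s t : Multiset Char) (h : x ∉ s) :
    s ∩ (x ::ₘ t) = s ∩ t := by
  ext c
  by_cases hc : c = x
  · subst hc
    simp [Multiset.count_inter, Multiset.count_eq_zero_of_notMem h]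
  · simp [Multiset.count_inter, hc]

theorem pv_matchGo_eq_inter_card (a b : List Char) :
    a.Pairwise (· ≤ ·) → b.Pairwise (· ≤ ·) →
    pvMatchGo a b = ((a : Multiset Char) ∩ (b : Multiset Char)).card := by
  fun_induction pvMatchGo a b with
  | case1 b => intro _ _; simp
  | case2 x a => intro _ _; simp
  | case3 a y b ih =>
    intro ha hb
    rw [List.pairwise_cons] at ha hb
    rw [show ((y :: a : List Char) : Multiset Char) = y ::ₘ (a : Multiset Char) from rfl,
        show ((y :: b : List Char) : Multiset Char) = y ::ₘ (b : Multiset Char) from rfl,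
        pv_cons_inter_cons, Multiset.card_cons, ih ha.2 hb.2]
  | case4 x a y b hne hlt ih =>
    intro ha hb
    rw [List.pairwise_cons] at ha
    have hx : x ∉ (y :: b) := by
      intro hmem
      rcases List.mem_cons.1 hmem with h | h
      · exact hne h
      · exact absurd ((List.pairwise_cons.1 hb).1 x h) (not_le.2 hlt)
    rw [show ((x :: a : List Char) : Multiset Char) = x ::ₘ (a : Multiset Char) from rfl,
        pv_cons_inter_of_notMem _ _ _ (by simpa using hx), ih ha.2 hb]
  | case5 x a y b hne hnlt ih =>
    intro ha hb
    rw [List.pairwise_cons] at hb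
    have hylt : y < x := lt_of_le_of_ne (not_lt.1 hnlt) (fun h => hne h.symm)
    have hy : y ∉ (x :: a) := by
      intro hmem
      rcases List.mem_cons.1 hmem with h | h
      · exact absurd (h ▸ hylt) (lt_irrefl _)
      · exact absurd ((List.pairwise_cons.1 ha).1 y h) (not_le.2 hylt)
    rw [show ((y :: b : List Char) : Multiset Char) = y ::ₘ (b : Multiset Char) from rfl,
        pv_inter_cons_of_notMem _ _ _ (by simpa using hy), ih ha hb.2]

-- sum of any list's counts over a superset of its characters is its length
theorem pv_sum_count_over (l : List Char) (T : Finset Char) (hT : ∀ c ∈ l, c ∈ T) :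
    (∑ c ∈ T, l.count c) = l.length := by
  have hsub : (l : Multiset Char).toFinset ⊆ T := by
    intro c hc
    exact hT c (by simpa using hc)
  calc (∑ c ∈ T, l.count c)
      = ∑ c ∈ (l : Multiset Char).toFinset, (l : Multiset Char).count c := by
        rw [Finset.sum_subset hsub]
        · simp [Multiset.coe_count]
        · intro c _ hc
          have : c ∉ l := by simpa using hc
          simp [List.count_eq_zero.2 this]
    _ = (l : Multiset Char).card := Multiset.toFinset_sum_count_eq _
    _ = l.length := by simp

theorem pv_sum_min_over (l1 l2 : List Char) (T : Finset Char) (hT : ∀ c ∈ l1, c ∈ T) :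
    (∑ c ∈ T, min (l1.count c) (l2.count c)) = ((l1 : Multiset Char) ∩ (l2 : Multiset Char)).card := by
  have hsub : ((l1 : Multiset Char) ∩ (l2 : Multiset Char)).toFinset ⊆ T := by
    intro c hc
    rw [Multiset.mem_toFinset] at hc
    exact hT c (by simpa using (Multiset.mem_inter.1 hc).1)
  calc (∑ c ∈ T, min (l1.count c) (l2.count c))
      = ∑ c ∈ T, ((l1 : Multiset Char) ∩ (l2 : Multiset Char)).count c := by
        refine Finset.sum_congr rfl (fun c _ => ?_)
        simp [Multiset.coe_count]
    _ = ∑ c ∈ ((l1 : Multiset Char) ∩ (l2 : Multiset Char)).toFinset,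
          ((l1 : Multiset Char) ∩ (l2 : Multiset Char)).count c := by
        rw [Finset.sum_subset hsub]
        intro c _ hc
        exact Multiset.count_eq_zero.2 (by simpa using hc)
    _ = _ := Multiset.toFinset_sum_count_eq _

theorem pv_sumAbs_closed (l1 l2 : List Char) :
    pvSumAbs l1 l2 = (l1.length : Int) + (l2.length : Int)
      - 2 * (((l1 : Multiset Char) ∩ (l2 : Multiset Char)).card : Int) := by
  unfold pvSumAbs
  set T : Finset Char := (l1 ++ l2).toFinset with hT
  have hnd := PySem.Set.nodup_ofList (l1 ++ l2)
  have hsum : ((PySem.Set.ofList (l1 ++ l2)).map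
      (fun c => |((l1.count c : Int)) - ((l2.count c : Int))|)).sum
      = ∑ c ∈ T, |((l1.count c : Int)) - ((l2.count c : Int))| := by
    rw [← List.sum_toFinset _ hnd]
    apply Finset.sum_congr _ (fun _ _ => rfl)
    ext c
    simp [hT, PySem.Set.mem_ofList]
  rw [hsum]
  have habs : ∀ c ∈ T, |((l1.count c : Int)) - ((l2.count c : Int))|
      = (l1.count c : Int) + (l2.count c : Int) - 2 * (((min (l1.count c) (l2.count c) : Nat)) : Int) := by
    intro c _
    rcases le_total (l1.count c) (l2.count c) with h | h
    · rw [min_eq_left h,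
        abs_of_nonpos (sub_nonpos.2 (by exact_mod_cast h : (l1.count c : Int) ≤ (l2.count c : Int)))]
      ring
    · rw [min_eq_right h,
        abs_of_nonneg (sub_nonneg.2 (by exact_mod_cast h : (l2.count c : Int) ≤ (l1.count c : Int)))]
      ring
  rw [Finset.sum_congr rfl habs]
  rw [Finset.sum_sub_distrib, Finset.sum_add_distrib, ← Finset.mul_sum]
  have h1 : (∑ c ∈ T, (l1.count c : Int)) = (l1.length : Int) := by
    rw [← Nat.cast_sum]
    exact_mod_cast congrArg (Nat.cast (R := Int))
      (pv_sum_count_over l1 T (fun c hc => by simp [hT, hc]))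
  have h2 : (∑ c ∈ T, (l2.count c : Int)) = (l2.length : Int) := by
    rw [← Nat.cast_sum]
    exact_mod_cast congrArg (Nat.cast (R := Int))
      (pv_sum_count_over l2 T (fun c hc => by simp [hT, hc]))
  have h3 : (∑ c ∈ T, ((min (l1.count c) (l2.count c) : Nat) : Int))
      = (((l1 : Multiset Char) ∩ (l2 : Multiset Char)).card : Int) := by
    rw [← Nat.cast_sum]
    exact_mod_cast congrArg (Nat.cast (R := Int))
      (pv_sum_min_over l1 l2 T (fun c hc => by simp [hT, hc]))
  rw [h1, h2, h3]

-- ===== VERDICT (by name: the statement is the Claim_ definition above) =====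
theorem anagram_difference_spec : Claim_equal_anagram_difference := by
  intro str1 str2 _
  unfold Spec_anagram_difference anagram_difference_alt
  rw [pv_A_eq_sumAbs, pv_sumAbs_closed]
  show _ = (PySem.Str.len str1 : Int) + (PySem.Str.len str2 : Int)
      - 2 * ((pvMatchGo (PySem.List.sorted str1.toList (fun c => c) false)
              (PySem.List.sorted str2.toList (fun c => c) false) : Nat) : Int)
  have hperm1 := PySem.List.sorted_perm str1.toList (fun c => c) false
  have hperm2 := PySem.List.sorted_perm str2.toList (fun c => c) false
  rw [pv_matchGo_eq_inter_card _ _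
      (by simpa using PySem.List.sorted_pairwise str1.toList (fun c => c))
      (by simpa using PySem.List.sorted_pairwise str2.toList (fun c => c)),
    Multiset.coe_eq_coe.2 hperm1, Multiset.coe_eq_coe.2 hperm2]
  simp [PySem.Str.len_eq]
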